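-- pv_equiv track=rewrite | github.com/lf1-io/padl | padl/print_utils.py | combine_multi_line_strings
-- ===== SOURCE A (Python) =====
-- from typing import Any, List
--
-- def combine_multi_line_strings(strings: List[str]):
--     """Combine multi line strings, where every character takes precedence over space.
--     (Image space is transparent and superimposing strings on top of one another.)
--
--     :param strings: list of multi-line strings
--     """
--     strings = [x.split('\n') for x in strings]
--     length = max([len(x) for x in strings])
--     lines = []
--     for i in range(length):
--         parts = [x[i] for x in strings if len(x) >= i + 1]
--         line = list(' ' * max([len(x) for x in parts]))
--         for j in range(len(line)):
--             for part in parts: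
--                 if len(part) >= j + 1:
--                     if part[j] != ' ':
--                         line[j] = part[j]
--         lines.append(''.join(line))
--     return '\n'.join(lines)
-- ===== SOURCE B (Python) =====
-- from typing import List
--
-- def combine_multi_line_strings(strings: List[str]):
--     """Superimpose multi-line strings: non-space characters override spaces.
--
--     Sparse two-phase algorithm: one scan writes every non-space character
--     into a coordinate dictionary {(row, col): char} (later writes win) and
--     records each row's width; a render phase then reads the canvas back.
--     """
--     canvas = {}
--     widths = []
--     for s in strings:
--         for i, line in enumerate(s.split('\n')):
--             if i == len(widths):
--                 widths.append(0)
--             if widths[i] < len(line):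
--                 widths[i] = len(line)
--             for j, ch in enumerate(line):
--                 if ch != ' ':
--                     canvas[(i, j)] = ch
--     return '\n'.join(
--         ''.join(canvas.get((i, j), ' ') for j in range(w))
--         for i, w in enumerate(widths))
-- ===== Notes on version B (the rewrite author's own statement) =====
-- stated objective: alternative
-- what changed: A builds each output line as a space buffer and, for every column, rescans every part for a non-space character; B uses a sparse coordinate dictionary {(row,col): char}: one scan phase writes each part's non-space characters into the dict (later writes win) while recording per-row widths, and a separate render phase reads the canvas back, touching each input character once.
-- outside the precondition, e.g. on combine_multi_line_strings([]): A raises ValueError, B returns ''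
import Mathlib
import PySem

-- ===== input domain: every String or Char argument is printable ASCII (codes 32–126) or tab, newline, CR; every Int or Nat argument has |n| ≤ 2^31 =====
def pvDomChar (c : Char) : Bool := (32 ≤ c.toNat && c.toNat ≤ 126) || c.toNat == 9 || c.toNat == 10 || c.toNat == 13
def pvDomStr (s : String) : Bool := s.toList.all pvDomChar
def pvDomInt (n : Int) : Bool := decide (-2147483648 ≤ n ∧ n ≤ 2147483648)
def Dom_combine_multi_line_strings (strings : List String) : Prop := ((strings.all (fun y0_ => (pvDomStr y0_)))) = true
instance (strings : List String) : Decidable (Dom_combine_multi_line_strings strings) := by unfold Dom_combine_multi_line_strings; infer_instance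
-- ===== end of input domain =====

-- B replaces A's per-line per-column scans by a sparse coordinate dictionary: one scan phase
-- writes non-space chars into {(row,col): char} plus per-row widths, then a render phase reads
-- the canvas back (objective: alternative).


-- ===== PORT A =====
-- max([len(x) for xs]) over a list of lists; Python max raises on [], which only
-- happens for strings = [] (excluded by Pre_): on nonempty lists of Nats this foldl is Python's max.
def pvMaxLen {α : Type} (xs : List (List α)) : Nat :=
  xs.foldl (fun acc x => max acc x.length) 0

-- the body of A's 'for i in range(length)' loop: line = list(' '*max(len)); for j: for part: …
def pvLineA (parts : List (List Char)) : List Char :=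
  (List.range (pvMaxLen parts)).foldl
    (fun line j =>
      parts.foldl
        (fun line part =>
          if j + 1 ≤ part.length then
            if part.getD j ' ' ≠ ' ' then line.set j (part.getD j ' ') else line
          else line)
        line)
    (List.replicate (pvMaxLen parts) ' ')

def combine_multi_line_strings (strings : List String) : String :=
  let grids := strings.map (fun s => PySem.Chars.splitOn s.toList ['\n'])
  let lines := (List.range (pvMaxLen grids)).map (fun i =>
    pvLineA ((grids.filter (fun x => decide (i + 1 ≤ x.length))).map (fun x => x.getD i [])))
  String.ofList (PySem.Chars.join ['\n'] lines)

-- ===== PORT B =====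
-- "for j, ch in enumerate(line): if ch != ' ': canvas[(i, j)] = ch"
def pvScanLine (canvas : PySem.Dict (Nat × Nat) Char) (i : Nat) (line : List Char) (j : Nat) :
    PySem.Dict (Nat × Nat) Char :=
  match line with
  | [] => canvas
  | c :: rest => pvScanLine (if c ≠ ' ' then canvas.insert (i, j) c else canvas) i rest (j + 1)

-- "for i, line in enumerate(s.split('\n')): widths bookkeeping; scan the line"
def pvScanRows (st : PySem.Dict (Nat × Nat) Char × List Nat) (i : Nat) (rows : List (List Char)) :
    PySem.Dict (Nat × Nat) Char × List Nat :=
  match rows with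
  | [] => st
  | line :: rest =>
    let widths := if i = st.2.length then st.2 ++ [0] else st.2
    let widths := if widths.getD i 0 < line.length then widths.set i line.length else widths
    pvScanRows (pvScanLine st.1 i line 0, widths) (i + 1) rest

def combine_multi_line_strings_alt (strings : List String) : String :=
  let st := strings.foldl
    (fun st s => pvScanRows st 0 (PySem.Chars.splitOn s.toList ['\n']))
    (PySem.Dict.empty, [])
  String.ofList (PySem.Chars.join ['\n']
    ((List.range st.2.length).map (fun i =>
      (List.range (st.2.getD i 0)).map (fun j => st.1.getD (i, j) ' '))))

-- ===== PRECONDITION & SPEC =====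
-- Pre_ excludes only strings = [], where Python A raises ValueError (max() of an empty list).
def Pre_combine_multi_line_strings (strings : List String) : Prop := strings ≠ []
instance (strings : List String) : Decidable (Pre_combine_multi_line_strings strings) := by
  unfold Pre_combine_multi_line_strings; infer_instance
def pvWitness_combine_multi_line_strings : List String := ["ab", " c"]

def Spec_combine_multi_line_strings (strings : List String) (out : String) : Prop := out = combine_multi_line_strings_alt strings
instance (strings : List String) (out : String) : Decidable (Spec_combine_multi_line_strings strings out) := by unfold Spec_combine_multi_line_strings; infer_instance

-- ===== CLAIM (what is proved, stated in full; the proofs are below) =====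
def Claim_equal_combine_multi_line_strings : Prop := ∀ (strings : List String), Dom_combine_multi_line_strings strings → Pre_combine_multi_line_strings strings → Spec_combine_multi_line_strings strings (combine_multi_line_strings strings)
-- ===== LEMMAS AND PROOFS =====

-- the parts present at row i, in strings order (A's "[x[i] for x in strings if len(x) >= i+1]")
def pvParts (gs : List (List (List Char))) (i : Nat) : List (List Char) :=
  (gs.filter (fun x => decide (i + 1 ≤ x.length))).map (fun x => x.getD i [])

-- the character both programs put at (i, j): the last non-space char among parts long enough
def pvColF (j : Nat) (init : Char) (parts : List (List Char)) : Char :=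
  parts.foldl (fun c part => if j < part.length ∧ part.getD j ' ' ≠ ' ' then part.getD j ' ' else c) init

def pvCol (parts : List (List Char)) (j : Nat) : Char := pvColF j ' ' parts

theorem pv_getD_set {α : Type} (l : List α) (i k : Nat) (c d : α) :
    (l.set i c).getD k d = if i = k ∧ i < l.length then c else l.getD k d := by
  simp only [List.getD, List.getElem?_set]
  rcases eq_or_ne i k with rfl | h1
  · by_cases h2 : i < l.length <;> simp [h2]
  · simp [h1]

theorem pv_getD_map_range {α : Type} (dflt : α) (f : Nat → α) (m k : Nat) :
    ((List.range m).map f).getD k dflt = if k < m then f k else dflt := by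
  by_cases h : k < m
  · simp [List.getD, h]
  · simp [List.getD, h]

theorem pv_maxLen_append {α : Type} (ps : List (List α)) (p : List α) :
    pvMaxLen (ps ++ [p]) = max (pvMaxLen ps) p.length := by
  simp [pvMaxLen, List.foldl_append]

theorem pv_col_append (ps : List (List Char)) (p : List Char) (j : Nat) :
    pvCol (ps ++ [p]) j = if j < p.length ∧ p.getD j ' ' ≠ ' ' then p.getD j ' ' else pvCol ps j := by
  simp [pvCol, pvColF, List.foldl_append]

-- rows beyond every grid have no parts
theorem pv_parts_nil (gs : List (List (List Char))) (i : Nat) (h : pvMaxLen gs ≤ i) :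
    pvParts gs i = [] := by
  unfold pvParts
  have : gs.filter (fun x => decide (i + 1 ≤ x.length)) = [] := by
    rw [List.filter_eq_nil_iff]
    intro x hx
    have hle : x.length ≤ pvMaxLen gs :=
      (PySem.List.le_foldl_max_nat gs (fun x => x.length) 0).2 x hx
    simp; omega
  rw [this]; rfl

theorem pv_parts_append (gs : List (List (List Char))) (g : List (List Char)) (i : Nat) :
    pvParts (gs ++ [g]) i = pvParts gs i ++ (if i + 1 ≤ g.length then [g.getD i []] else []) := by
  unfold pvParts
  rw [List.filter_append, List.map_append]
  congr 1
  by_cases h : i + 1 ≤ g.length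
  · have hd : decide (i + 1 ≤ g.length) = true := by simpa using h
    rw [if_pos h, List.filter_singleton, hd]
    rfl
  · have hd : decide (i + 1 ≤ g.length) = false := by simpa using h
    rw [if_neg h, List.filter_singleton, hd]
    rfl

-- A's inner loop over parts at a fixed column j sets exactly index j to the folded column char
theorem pv_innerA_eq (parts : List (List Char)) : ∀ (line : List Char) (j : Nat), j < line.length →
    parts.foldl
      (fun line part =>
        if j + 1 ≤ part.length then
          if part.getD j ' ' ≠ ' ' then line.set j (part.getD j ' ') else line
        else line)
      line
    = line.set j (pvColF j (line.getD j ' ') parts) := by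
  induction parts with
  | nil =>
    intro line j hj
    rw [List.foldl_nil]
    show line = line.set j (line.getD j ' ')
    rw [List.getD_eq_getElem _ _ hj]
    simp
  | cons part ps ih =>
    intro line j hj
    rw [List.foldl_cons]
    have hstep : pvColF j (line.getD j ' ') (part :: ps)
        = pvColF j (if j < part.length ∧ part.getD j ' ' ≠ ' ' then part.getD j ' ' else line.getD j ' ') ps := rfl
    rw [hstep]
    by_cases h1 : j + 1 ≤ part.length
    · by_cases h2 : part.getD j ' ' = ' '
      · have hno : ¬ (j < part.length ∧ part.getD j ' ' ≠ ' ') := by rintro ⟨_, hx⟩; exact hx h2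
        rw [if_pos h1, if_neg (not_not_intro h2), if_neg hno]
        exact ih line j hj
      · rw [if_pos h1, if_pos h2, if_pos ⟨h1, h2⟩]
        rw [ih (line.set j (part.getD j ' ')) j (by simpa using hj), List.set_set]
        have : (line.set j (part.getD j ' ')).getD j ' ' = part.getD j ' ' := by
          rw [pv_getD_set, if_pos ⟨rfl, hj⟩]
        rw [this]
    · have hno : ¬ (j < part.length ∧ part.getD j ' ' ≠ ' ') := by rintro ⟨hx, _⟩; omega
      rw [if_neg h1, if_neg hno]
      exact ih line j hj

-- A's outer loop over columns, cut off at k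
theorem pv_outerA (parts : List (List Char)) (w : Nat) : ∀ (k : Nat), k ≤ w →
    (List.range k).foldl
      (fun line j =>
        parts.foldl
          (fun line part =>
            if j + 1 ≤ part.length then
              if part.getD j ' ' ≠ ' ' then line.set j (part.getD j ' ') else line
            else line)
          line)
      (List.replicate w ' ')
    = (List.range w).map (fun j => if j < k then pvCol parts j else ' ') := by
  intro k
  induction k with
  | zero =>
    intro _
    simp only [List.range_zero, List.foldl_nil]
    apply List.ext_getElem
    · simp
    · intro n h1 h2
      simp
  | succ k ih =>
    intro hk
    rw [List.range_succ, List.foldl_append, List.foldl_cons, List.foldl_nil, ih (by omega)]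
    have hlen : k < ((List.range w).map (fun j => if j < k then pvCol parts j else ' ')).length := by
      simp; omega
    rw [pv_innerA_eq parts _ k hlen]
    have hinit : ((List.range w).map (fun j => if j < k then pvCol parts j else ' ')).getD k ' ' = ' ' := by
      rw [pv_getD_map_range]; simp
    rw [hinit]
    apply List.ext_getElem
    · simp
    · intro n h1 h2
      rw [List.getElem_set]
      simp only [List.getElem_map, List.getElem_range]
      have hn : n < w := by simpa using h2
      by_cases hkn : k = n
      · subst hkn
        simp [pvCol]
      · have h3 : (n < k) ↔ (n < k + 1) := by omega
        simp [hkn, h3]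

-- A's per-line computation equals the column map
theorem pv_lineA_eq (parts : List (List Char)) :
    pvLineA parts = (List.range (pvMaxLen parts)).map (pvCol parts) := by
  unfold pvLineA
  rw [pv_outerA parts (pvMaxLen parts) (pvMaxLen parts) (le_refl _)]
  apply List.ext_getElem
  · simp
  · intro n h1 h2
    simp only [List.getElem_map, List.getElem_range]
    have : n < pvMaxLen parts := by simpa using h1
    simp [this]

-- appending the 0 cell Python's "widths.append(0)" adds does not change any getD
theorem pv_getD_append_zero (w : List Nat) (n : Nat) : (w ++ [0]).getD n 0 = w.getD n 0 := by
  simp only [List.getD, List.getElem?_append]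
  by_cases h : n < w.length
  · simp [h]
  · by_cases h2 : n = w.length
    · subst h2; simp
    · have h1 : w[n]? = none := by rw [List.getElem?_eq_none_iff]; omega
      have h3 : ([0] : List Nat)[n - w.length]? = none := by rw [List.getElem?_eq_none_iff]; simp; omega
      simp [h, h3]

-- scanning one line writes exactly its non-space characters at row i
theorem pv_getD_pvScanLine (line : List Char) : ∀ (canvas : PySem.Dict (Nat × Nat) Char) (i j0 i' j : Nat),
    (pvScanLine canvas i line j0).getD (i', j) ' ' =
      if i' = i ∧ j0 ≤ j ∧ j < j0 + line.length ∧ line.getD (j - j0) ' ' ≠ ' '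
      then line.getD (j - j0) ' ' else canvas.getD (i', j) ' ' := by
  induction line with
  | nil =>
    intro canvas i j0 i' j
    have : ¬ (i' = i ∧ j0 ≤ j ∧ j < j0 + ([] : List Char).length ∧ ([] : List Char).getD (j - j0) ' ' ≠ ' ') := by
      rintro ⟨_, h1, h2, _⟩; simp at h2; omega
    rw [pvScanLine, if_neg this]
  | cons c rest ih =>
    intro canvas i j0 i' j
    rw [pvScanLine, ih]
    have hins : (if c ≠ ' ' then canvas.insert (i, j0) c else canvas).getD (i', j) ' '
        = if i' = i ∧ j = j0 ∧ c ≠ ' ' then c else canvas.getD (i', j) ' ' := by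
      by_cases hc : c = ' '
      · subst hc; simp
      · rw [if_pos hc, PySem.Dict.getD_insert]
        by_cases hk : (i', j) = (i, j0)
        · have hk' := hk
          simp only [Prod.mk.injEq] at hk'
          rw [if_pos hk, if_pos ⟨hk'.1, hk'.2, hc⟩]
        · rw [if_neg hk, if_neg (by rintro ⟨h1, h2, _⟩; exact hk (by rw [h1, h2]))]
    rw [hins]
    by_cases hij : i' = i
    · subst hij
      by_cases hj0 : j = j0
      · subst hj0
        rw [if_neg (show ¬ (i' = i' ∧ j + 1 ≤ j ∧ j < j + 1 + rest.length ∧ rest.getD (j - (j + 1)) ' ' ≠ ' ') from by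
          rintro ⟨_, h1, _, _⟩; omega)]
        have hget0 : (c :: rest).getD (j - j) ' ' = c := by simp [List.getD]
        by_cases hc : c = ' '
        · rw [if_neg (show ¬ (i' = i' ∧ j = j ∧ c ≠ ' ') from by rintro ⟨_, _, hx⟩; exact hx hc),
            if_neg (show ¬ (i' = i' ∧ j ≤ j ∧ j < j + (c :: rest).length ∧ (c :: rest).getD (j - j) ' ' ≠ ' ') from by
              rintro ⟨_, _, _, h3⟩; rw [hget0] at h3; exact h3 hc)]
        · rw [if_pos (show i' = i' ∧ j = j ∧ c ≠ ' ' from ⟨rfl, rfl, hc⟩),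
            if_pos (show i' = i' ∧ j ≤ j ∧ j < j + (c :: rest).length ∧ (c :: rest).getD (j - j) ' ' ≠ ' ' from
              ⟨rfl, le_refl _, by simp [List.length_cons], by rw [hget0]; exact hc⟩), hget0]
      · by_cases hlt : j0 + 1 ≤ j
        · have hidx : rest.getD (j - (j0 + 1)) ' ' = (c :: rest).getD (j - j0) ' ' := by
            have h5 : j - j0 = (j - (j0 + 1)) + 1 := by omega
            rw [h5]; simp [List.getD]
          have hiff : (i' = i' ∧ j0 + 1 ≤ j ∧ j < j0 + 1 + rest.length ∧ rest.getD (j - (j0 + 1)) ' ' ≠ ' ')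
              ↔ (i' = i' ∧ j0 ≤ j ∧ j < j0 + (c :: rest).length ∧ (c :: rest).getD (j - j0) ' ' ≠ ' ') := by
            rw [hidx]
            simp only [List.length_cons]
            constructor
            · rintro ⟨_, h1, h2, h3⟩; exact ⟨by trivial, by omega, by omega, h3⟩
            · rintro ⟨_, h1, h2, h3⟩; exact ⟨by trivial, hlt, by omega, h3⟩
          rw [if_congr hiff hidx rfl,
            if_neg (show ¬ (i' = i' ∧ j = j0 ∧ c ≠ ' ') from by rintro ⟨_, h2, _⟩; exact hj0 h2)]
        · rw [if_neg (show ¬ (i' = i' ∧ j0 + 1 ≤ j ∧ j < j0 + 1 + rest.length ∧ rest.getD (j - (j0 + 1)) ' ' ≠ ' ') from by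
              rintro ⟨_, h1, _, _⟩; omega),
            if_neg (show ¬ (i' = i' ∧ j = j0 ∧ c ≠ ' ') from by rintro ⟨_, h2, _⟩; exact hj0 h2),
            if_neg (show ¬ (i' = i' ∧ j0 ≤ j ∧ j < j0 + (c :: rest).length ∧ (c :: rest).getD (j - j0) ' ' ≠ ' ') from by
              rintro ⟨_, h1, _, _⟩; omega)]
    · simp only [hij, false_and, if_false]

-- scanning the rows of one grid, widths half
theorem pv_scanRows_snd (rows : List (List Char)) :
    ∀ (st : PySem.Dict (Nat × Nat) Char × List Nat) (i0 : Nat), i0 ≤ st.2.length →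
    (pvScanRows st i0 rows).2 =
      (List.range (max st.2.length (i0 + rows.length))).map
        (fun i => if i0 ≤ i ∧ i < i0 + rows.length
          then max (st.2.getD i 0) ((rows.getD (i - i0) []).length) else st.2.getD i 0) := by
  induction rows with
  | nil =>
    intro st i0 h
    rw [pvScanRows]
    apply List.ext_getElem
    · simp; omega
    · intro n h1 h2
      have hn : n < st.2.length := h1
      simp only [List.getElem_map, List.getElem_range]
      rw [if_neg (by rintro ⟨ha, hb⟩; simp at hb; omega), List.getD_eq_getElem _ _ hn]
  | cons line rest ih =>
    intro st i0 h
    rw [pvScanRows]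
    have hbase_get : ∀ n, (if i0 = st.2.length then st.2 ++ [0] else st.2).getD n 0 = st.2.getD n 0 := by
      intro n; split
      · exact pv_getD_append_zero st.2 n
      · rfl
    have hbase_lt : i0 < (if i0 = st.2.length then st.2 ++ [0] else st.2).length := by
      by_cases hE : i0 = st.2.length
      · rw [if_pos hE, List.length_append, List.length_singleton]; omega
      · rw [if_neg hE]; omega
    have hbase_len : (if i0 = st.2.length then st.2 ++ [0] else st.2).length = max st.2.length (i0 + 1) := by
      by_cases hE : i0 = st.2.length
      · rw [if_pos hE, List.length_append, List.length_singleton]; omega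
      · rw [if_neg hE]; omega
    set b := (if i0 = st.2.length then st.2 ++ [0] else st.2) with hb
    set w2 := (if b.getD i0 0 < line.length then b.set i0 line.length else b) with hw2
    have hw2_len : w2.length = max st.2.length (i0 + 1) := by
      rw [hw2]; split
      · rw [List.length_set, hbase_len]
      · exact hbase_len
    have hw2_get : ∀ n, w2.getD n 0 = if n = i0 then max (st.2.getD n 0) line.length else st.2.getD n 0 := by
      intro n
      rw [hw2]
      by_cases hlt : b.getD i0 0 < line.length
      · rw [if_pos hlt, pv_getD_set]
        rw [hbase_get] at hlt
        by_cases hn : n = i0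
        · subst hn
          rw [if_pos ⟨rfl, hbase_lt⟩, if_pos rfl, Nat.max_eq_right (Nat.le_of_lt hlt)]
        · rw [if_neg (by rintro ⟨h1, _⟩; exact hn h1.symm), hbase_get, if_neg hn]
      · rw [if_neg hlt, hbase_get]
        rw [hbase_get] at hlt
        by_cases hn : n = i0
        · subst hn
          rw [if_pos rfl, Nat.max_eq_left (by omega)]
        · rw [if_neg hn]
    rw [ih (pvScanLine st.1 i0 line 0, w2) (i0 + 1) (show i0 + 1 ≤ w2.length from by rw [hw2_len]; omega)]
    apply List.ext_getElem
    · simp only [List.length_map, List.length_range, hw2_len, List.length_cons]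
      omega
    · intro n h1 h2
      have hn : n < max st.2.length (i0 + (line :: rest).length) := by simpa using h2
      simp only [List.getElem_map, List.getElem_range]
      rw [hw2_get]
      by_cases hcase : i0 + 1 ≤ n ∧ n < i0 + 1 + rest.length
      · have hne : ¬ n = i0 := by omega
        rw [if_pos hcase, if_neg hne,
          if_pos (show i0 ≤ n ∧ n < i0 + (line :: rest).length from
            ⟨by omega, by simp only [List.length_cons]; omega⟩)]
        have hidx : (line :: rest).getD (n - i0) [] = rest.getD (n - (i0 + 1)) [] := by
          have h5 : n - i0 = (n - (i0 + 1)) + 1 := by omega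
          rw [h5]; simp [List.getD]
        rw [hidx]
      · rw [if_neg hcase]
        by_cases hni : n = i0
        · subst hni
          rw [if_pos rfl,
            if_pos (show n ≤ n ∧ n < n + (line :: rest).length from
              ⟨le_refl _, by simp only [List.length_cons]; omega⟩)]
          have hidx : (line :: rest).getD (n - n) [] = line := by simp [List.getD]
          rw [hidx]
        · rw [if_neg hni,
            if_neg (show ¬ (i0 ≤ n ∧ n < i0 + (line :: rest).length) from by
              rintro ⟨hA, hB⟩; simp only [List.length_cons] at hB; omega)]

-- scanning the rows of one grid, canvas half
theorem pv_scanRows_fst (rows : List (List Char)) :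
    ∀ (st : PySem.Dict (Nat × Nat) Char × List Nat) (i0 i j : Nat),
    (pvScanRows st i0 rows).1.getD (i, j) ' ' =
      if i0 ≤ i ∧ i < i0 + rows.length ∧ j < (rows.getD (i - i0) []).length
          ∧ (rows.getD (i - i0) []).getD j ' ' ≠ ' '
      then (rows.getD (i - i0) []).getD j ' ' else st.1.getD (i, j) ' ' := by
  induction rows with
  | nil =>
    intro st i0 i j
    rw [pvScanRows, if_neg (by rintro ⟨_, h2, _, _⟩; simp at h2; omega)]
  | cons line rest ih =>
    intro st i0 i j
    rw [pvScanRows, ih]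
    by_cases hcase : i0 + 1 ≤ i ∧ i < i0 + 1 + rest.length
    · have hget : rest.getD (i - (i0 + 1)) [] = (line :: rest).getD (i - i0) [] := by
        have h5 : i - i0 = (i - (i0 + 1)) + 1 := by omega
        rw [h5]; simp [List.getD]
      rw [hget]
      by_cases hcj : j < ((line :: rest).getD (i - i0) []).length
          ∧ ((line :: rest).getD (i - i0) []).getD j ' ' ≠ ' '
      · rw [if_pos (show i0 + 1 ≤ i ∧ i < i0 + 1 + rest.length
              ∧ j < ((line :: rest).getD (i - i0) []).length
              ∧ ((line :: rest).getD (i - i0) []).getD j ' ' ≠ ' ' from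
            ⟨hcase.1, hcase.2, hcj.1, hcj.2⟩),
          if_pos (show i0 ≤ i ∧ i < i0 + (line :: rest).length
              ∧ j < ((line :: rest).getD (i - i0) []).length
              ∧ ((line :: rest).getD (i - i0) []).getD j ' ' ≠ ' ' from
            ⟨by omega, by simp only [List.length_cons]; omega, hcj.1, hcj.2⟩)]
      · have hA : ¬ (i0 + 1 ≤ i ∧ i < i0 + 1 + rest.length
            ∧ j < ((line :: rest).getD (i - i0) []).length
            ∧ ((line :: rest).getD (i - i0) []).getD j ' ' ≠ ' ') := by
          rintro ⟨_, _, h3, h4⟩; exact hcj ⟨h3, h4⟩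
        have hB : ¬ (i0 ≤ i ∧ i < i0 + (line :: rest).length
            ∧ j < ((line :: rest).getD (i - i0) []).length
            ∧ ((line :: rest).getD (i - i0) []).getD j ' ' ≠ ' ') := by
          rintro ⟨_, _, h3, h4⟩; exact hcj ⟨h3, h4⟩
        rw [if_neg hA, if_neg hB]
        show (pvScanLine st.1 i0 line 0).getD (i, j) ' ' = st.1.getD (i, j) ' '
        rw [pv_getD_pvScanLine, if_neg (by rintro ⟨h1, _, _, _⟩; omega)]
    · have hA : ¬ (i0 + 1 ≤ i ∧ i < i0 + 1 + rest.length
          ∧ j < (rest.getD (i - (i0 + 1)) []).length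
          ∧ (rest.getD (i - (i0 + 1)) []).getD j ' ' ≠ ' ') := by
        rintro ⟨h1, h2, _, _⟩; exact hcase ⟨h1, h2⟩
      rw [if_neg hA]
      show (pvScanLine st.1 i0 line 0).getD (i, j) ' '
        = if i0 ≤ i ∧ i < i0 + (line :: rest).length ∧ j < ((line :: rest).getD (i - i0) []).length
            ∧ ((line :: rest).getD (i - i0) []).getD j ' ' ≠ ' '
          then ((line :: rest).getD (i - i0) []).getD j ' ' else st.1.getD (i, j) ' '
      rw [pv_getD_pvScanLine]
      by_cases hi : i = i0
      · subst hi
        have hget0 : (line :: rest).getD (i - i) [] = line := by simp [List.getD]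
        by_cases hcj : j < line.length ∧ line.getD j ' ' ≠ ' '
        · rw [if_pos (show i = i ∧ 0 ≤ j ∧ j < 0 + line.length ∧ line.getD (j - 0) ' ' ≠ ' ' from
              ⟨rfl, Nat.zero_le _, by omega, by simpa using hcj.2⟩),
            if_pos (show i ≤ i ∧ i < i + (line :: rest).length
                ∧ j < ((line :: rest).getD (i - i) []).length
                ∧ ((line :: rest).getD (i - i) []).getD j ' ' ≠ ' ' from
              ⟨le_refl _, by simp only [List.length_cons]; omega,
                by rw [hget0]; exact hcj.1, by rw [hget0]; exact hcj.2⟩)]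
          rw [hget0]; simp
        · rw [if_neg (show ¬ (i = i ∧ 0 ≤ j ∧ j < 0 + line.length ∧ line.getD (j - 0) ' ' ≠ ' ') from by
              rintro ⟨_, _, h3, h4⟩; exact hcj ⟨by omega, by simpa using h4⟩),
            if_neg (show ¬ (i ≤ i ∧ i < i + (line :: rest).length
                ∧ j < ((line :: rest).getD (i - i) []).length
                ∧ ((line :: rest).getD (i - i) []).getD j ' ' ≠ ' ') from by
              rintro ⟨_, _, h3, h4⟩; rw [hget0] at h3 h4; exact hcj ⟨h3, h4⟩)]
      · rw [if_neg (show ¬ (i = i0 ∧ 0 ≤ j ∧ j < 0 + line.length ∧ line.getD (j - 0) ' ' ≠ ' ') from by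
            rintro ⟨h1, _, _, _⟩; exact hi h1),
          if_neg (show ¬ (i0 ≤ i ∧ i < i0 + (line :: rest).length
              ∧ j < ((line :: rest).getD (i - i0) []).length
              ∧ ((line :: rest).getD (i - i0) []).getD j ' ' ≠ ' ') from by
            rintro ⟨h1, h2, _, _⟩
            simp only [List.length_cons] at h2
            exact hcase ⟨by omega, by omega⟩)]

-- the scan phase's final state, characterized row by row / cell by cell
theorem pv_scan_invariant (gs : List (List (List Char))) :
    (gs.foldl (fun st g => pvScanRows st 0 g) (PySem.Dict.empty, [])).2
      = (List.range (pvMaxLen gs)).map (fun i => pvMaxLen (pvParts gs i))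
    ∧ ∀ i j, (gs.foldl (fun st g => pvScanRows st 0 g) (PySem.Dict.empty, [])).1.getD (i, j) ' '
      = pvCol (pvParts gs i) j := by
  induction gs using List.reverseRecOn with
  | nil =>
    constructor
    · simp [pvMaxLen]
    · intro i j
      have : pvCol (pvParts [] i) j = ' ' := by
        rw [pv_parts_nil [] i (by simp [pvMaxLen])]
        rfl
      rw [this]
      rfl
  | append_singleton ps g ih =>
    obtain ⟨ih2, ih1⟩ := ih
    rw [List.foldl_append, List.foldl_cons, List.foldl_nil]
    set st := ps.foldl (fun st g => pvScanRows st 0 g) (PySem.Dict.empty, []) with hst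
    have hlen : st.2.length = pvMaxLen ps := by rw [ih2]; simp
    have hgetw : ∀ i, st.2.getD i 0 = pvMaxLen (pvParts ps i) := by
      intro i
      rw [ih2, pv_getD_map_range]
      by_cases h : i < pvMaxLen ps
      · rw [if_pos h]
      · rw [if_neg h, pv_parts_nil ps i (by omega)]
        rfl
    constructor
    · rw [pv_scanRows_snd g st 0 (Nat.zero_le _)]
      apply List.ext_getElem
      · simp only [List.length_map, List.length_range, hlen, pv_maxLen_append, Nat.zero_add]
      · intro n h1 h2
        simp only [List.getElem_map, List.getElem_range]
        have hn : n < max st.2.length (0 + g.length) := by simpa using h1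
        rw [hgetw]
        by_cases hc : n < g.length
        · rw [if_pos ⟨Nat.zero_le _, by omega⟩]
          have hp : pvParts (ps ++ [g]) n = pvParts ps n ++ [g.getD n []] := by
            rw [pv_parts_append, if_pos (by omega)]
          rw [hp, pv_maxLen_append]
          simp
        · rw [if_neg (by rintro ⟨_, hx⟩; omega)]
          have hp : pvParts (ps ++ [g]) n = pvParts ps n := by
            rw [pv_parts_append, if_neg (by omega)]
            simp
          rw [hp]
    · intro i j
      rw [pv_scanRows_fst g st 0 i j]
      by_cases hc : i < g.length
      · have hp : pvParts (ps ++ [g]) i = pvParts ps i ++ [g.getD i []] := by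
          rw [pv_parts_append, if_pos (by omega)]
        rw [hp, pv_col_append]
        by_cases hcj : j < (g.getD i []).length ∧ (g.getD i []).getD j ' ' ≠ ' '
        · rw [if_pos ⟨Nat.zero_le _, by omega, by simpa using hcj.1, by simpa using hcj.2⟩,
            if_pos hcj]
          simp
        · rw [if_neg (by rintro ⟨_, _, h3, h4⟩; exact hcj ⟨by simpa using h3, by simpa using h4⟩),
            if_neg hcj, ih1]
      · have hp : pvParts (ps ++ [g]) i = pvParts ps i := by
          rw [pv_parts_append, if_neg (by omega)]
          simp
        rw [if_neg (by rintro ⟨_, h2, _, _⟩; omega), hp, ih1]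

-- ===== VERDICT (by name: the statement is the Claim_ definition above) =====
theorem combine_multi_line_strings_spec : Claim_equal_combine_multi_line_strings := by
  intro strings _ _
  unfold Spec_combine_multi_line_strings combine_multi_line_strings combine_multi_line_strings_alt
  simp only []
  have hfold : ∀ (l : List String) (init : PySem.Dict (Nat × Nat) Char × List Nat),
      l.foldl (fun st s => pvScanRows st 0 (PySem.Chars.splitOn s.toList ['\n'])) init
        = (l.map (fun s => PySem.Chars.splitOn s.toList ['\n'])).foldl
            (fun st g => pvScanRows st 0 g) init := by
    intro l
    induction l with
    | nil => intro init; rfl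
    | cons a t iht =>
      intro init
      simp only [List.foldl_cons, List.map_cons]
      exact iht _
  rw [hfold]
  set gs := strings.map (fun s => PySem.Chars.splitOn s.toList ['\n']) with hgs
  set st := gs.foldl (fun st g => pvScanRows st 0 g) (PySem.Dict.empty, []) with hst
  obtain ⟨h2, h1⟩ := pv_scan_invariant gs
  rw [← hst] at h2 h1
  have hlen : st.2.length = pvMaxLen gs := by rw [h2]; simp
  congr 1
  congr 1
  rw [hlen]
  apply List.map_congr_left
  intro i hi
  have hiR : i < pvMaxLen gs := by simpa using hi
  have hw : st.2.getD i 0 = pvMaxLen (pvParts gs i) := by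
    rw [h2, pv_getD_map_range, if_pos hiR]
  rw [pv_lineA_eq]
  show (List.range (pvMaxLen (pvParts gs i))).map (pvCol (pvParts gs i))
      = (List.range (st.2.getD i 0)).map (fun j => st.1.getD (i, j) ' ')
  rw [hw]
  apply List.map_congr_left
  intro j _
  rw [h1 i j]
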